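-- pv_equiv track=rewrite | github.com/marfuta07/DZ_bank | src/bank_operations.py | process_bank_operations
-- ===== SOURCE A (Python) =====
-- from collections import Counter
-- from typing import List, Dict, Any
--
-- def process_bank_operations (data: List[Dict[str, Any]], categories: List[str]) -> Dict[str, int]:
--     """
--     Подсчитывает количество банковских операций в каждой из заданных категорий.
--     Категории определяются по вхождению строки из `categories`
--     в поле `description` каждой операции (регистронезависимо).
--     *Используется `Counter` для эффективного подсчёта.*
--     Параметры:
--     - data: список словарей с данными операций (обязательно с полем 'description')
--     - categories: список строк — названия категорий для поиска
--     Возвращает: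
--     - словарь: ключ — категория, значение — количество операций, где она найдена
--     """
--     # Список для хранения найденных категорий по каждой операции
--     matched_categories = []
--
--     # Приводим категории к нижнему регистру для регистронезависимого поиска
--     lower_categories = [cat.lower() for cat in categories]
--
--     for operation in data:
--         desc = operation.get("description", "").lower()
--         # Проверяем, к какой категории относится описание
--         for cat in lower_categories:
--             if cat in desc:
--                 matched_categories.append(cat)
--                 break  # Операция относится только к одной категории (первая найденная)
--
--     # Считаем количество по каждой категории
--     counts = Counter(matched_categories)
--     # Возвращаем обычный словарь, включая категории с нулём, если нужно их явно указать
--     return {cat: counts.get(cat.lower(), 0) for cat in categories}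
-- ===== SOURCE B (Python) =====
-- def process_bank_operations(data, categories):
--     """Category-major re-implementation: one partition pass per category over a
--     shrinking list of descriptions, instead of a per-operation inner scan + Counter."""
--     remaining = [op.get("description", "").lower() for op in data]
--     counts = {}
--     for cat in categories:
--         low = cat.lower()
--         hits = 0
--         kept = []
--         for d in remaining:
--             if low in d:
--                 hits += 1
--             else:
--                 kept.append(d)
--         counts[low] = counts.get(low, 0) + hits
--         remaining = kept
--     return {cat: counts[cat.lower()] for cat in categories}
-- ===== Notes on version B (the rewrite author's own statement) =====
-- stated objective: alternative
-- what changed: A scans categories per operation (break on first hit) and then Counter-aggregates a matched list; B is category-major: for each category in order it counts and removes the matching descriptions from a shrinking list, accumulating counts directly.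
import Mathlib
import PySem

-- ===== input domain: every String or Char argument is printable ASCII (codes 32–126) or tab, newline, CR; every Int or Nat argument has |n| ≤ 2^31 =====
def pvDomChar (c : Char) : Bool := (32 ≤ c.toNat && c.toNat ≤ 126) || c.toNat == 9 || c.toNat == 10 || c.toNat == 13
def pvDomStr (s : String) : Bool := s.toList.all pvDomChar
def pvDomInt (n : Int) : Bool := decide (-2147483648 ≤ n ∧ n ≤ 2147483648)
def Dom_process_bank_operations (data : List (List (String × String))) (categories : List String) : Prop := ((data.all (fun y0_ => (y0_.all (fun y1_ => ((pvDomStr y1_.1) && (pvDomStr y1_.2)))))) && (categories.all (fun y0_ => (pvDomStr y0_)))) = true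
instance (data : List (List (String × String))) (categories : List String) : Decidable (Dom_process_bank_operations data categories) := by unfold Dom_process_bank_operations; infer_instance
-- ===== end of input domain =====

-- B replaces A's per-operation inner category scan + Counter with a category-major
-- filter-and-remove pass over a shrinking list of descriptions (alternative algorithm, same result).

-- ===== PORT A =====
-- desc = operation.get("description", "").lower()
def pvDescOf (op : List (String × String)) : String :=
  PySem.Str.lower (PySem.Dict.getD (PySem.Dict.mk op) "description" "")

def process_bank_operations (data : List (List (String × String))) (categories : List String) : List (String × Int) :=
  let lower_categories := categories.map PySem.Str.lower
  -- for operation in data: append the first matching lowered category (break = find?)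
  let matched_categories := data.foldl (fun acc operation =>
    let desc := pvDescOf operation
    match lower_categories.find? (fun cat => PySem.Str.isIn cat desc) with
    | some cat => acc ++ [cat]
    | none => acc) []
  let counts := PySem.Dict.counter matched_categories
  -- {cat: counts.get(cat.lower(), 0) for cat in categories}
  (categories.foldl (fun d cat => d.insert cat (counts.getD (PySem.Str.lower cat) 0))
    PySem.Dict.empty).items

-- ===== PORT B =====
-- one step of B's "for cat in categories" loop: partition `remaining`, add the hit count
def pvBStep (st : PySem.Dict String Int × List String) (cat : String) :
    PySem.Dict String Int × List String :=
  let low := PySem.Str.lower cat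
  let hr := st.2.foldl (fun (acc : Int × List String) d =>
    if PySem.Str.isIn low d then (acc.1 + 1, acc.2) else (acc.1, acc.2 ++ [d])) (0, [])
  (st.1.insert low (st.1.getD low 0 + hr.1), hr.2)

def process_bank_operations_alt (data : List (List (String × String))) (categories : List String) : List (String × Int) :=
  let remaining := data.map pvDescOf
  let counts := (categories.foldl pvBStep (PySem.Dict.empty, remaining)).1
  -- {cat: counts[cat.lower()] for cat in categories}
  (categories.foldl (fun d cat => d.insert cat (counts.getD (PySem.Str.lower cat) 0))
    PySem.Dict.empty).items

-- ===== PRECONDITION & SPEC =====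
def Spec_process_bank_operations (data : List (List (String × String))) (categories : List String) (out : List (String × Int)) : Prop := out = process_bank_operations_alt data categories
instance (data : List (List (String × String))) (categories : List String) (out : List (String × Int)) : Decidable (Spec_process_bank_operations data categories out) := by unfold Spec_process_bank_operations; infer_instance

-- ===== CLAIM (what is proved, stated in full; the proofs are below) =====
def Claim_equal_process_bank_operations : Prop := ∀ (data : List (List (String × String))) (categories : List String), Dom_process_bank_operations data categories → Spec_process_bank_operations data categories (process_bank_operations data categories)

-- ===== LEMMAS AND PROOFS =====

-- the first lowered category contained in d (A's inner loop / what B's removal preserves)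
def pvFirstMatch (ls : List String) (d : String) : Option String :=
  ls.find? (fun c => PySem.Str.isIn c d)

-- A's matched_categories list is the filterMap of pvFirstMatch over the descriptions
theorem pvA_matched (lowers : List String) (data : List (List (String × String))) (acc : List String) :
    data.foldl (fun acc operation =>
      match lowers.find? (fun cat => PySem.Str.isIn cat (pvDescOf operation)) with
      | some cat => acc ++ [cat]
      | none => acc) acc
    = acc ++ (data.map pvDescOf).filterMap (pvFirstMatch lowers) := by
  induction data generalizing acc with
  | nil => simp
  | cons op rest ih =>
    cases h : lowers.find? (fun cat => PySem.Str.isIn cat (pvDescOf op)) with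
    | none =>
      have hh : pvFirstMatch lowers (pvDescOf op) = none := h
      simp only [List.foldl_cons, List.map_cons, List.filterMap_cons, hh, h]
      exact ih acc
    | some c =>
      have hh : pvFirstMatch lowers (pvDescOf op) = some c := h
      simp only [List.foldl_cons, List.map_cons, List.filterMap_cons, hh, h]
      rw [ih]
      simp only [List.append_assoc, List.cons_append, List.nil_append]

-- count of c in a filterMap = countP of "f hits c"
theorem pvCount_filterMap (f : String → Option String) (l : List String) (c : String) :
    (l.filterMap f).count c = l.countP (fun d => f d == some c) := by
  induction l with
  | nil => rfl
  | cons d rest ih =>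
    simp only [List.filterMap_cons]
    cases h : f d with
    | none => simpa [List.countP_cons, h] using ih
    | some c' =>
      by_cases hc : c' = c
      · subst hc; simp [h, ih]
      · simp [h, ih, hc]

-- B's inner partition loop: hits = countP, kept = filter of the complement
theorem pvPartition (p : String → Bool) (l : List String) (h0 : Int) (r0 : List String) :
    l.foldl (fun (acc : Int × List String) d =>
      if p d then (acc.1 + 1, acc.2) else (acc.1, acc.2 ++ [d])) (h0, r0)
    = (h0 + (l.countP p : Int), r0 ++ l.filter (fun d => !p d)) := by
  induction l generalizing h0 r0 with
  | nil => simp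
  | cons d rest ih =>
    by_cases h : p d
    · simp [h, ih]
      ring
    · simp [h, ih]

-- invariant of B's category loop: the final count at c adds, to the running count,
-- the number of remaining descriptions whose first match among the pending categories is c
theorem pvB_invariant (cats : List String) (counts : PySem.Dict String Int)
    (remaining : List String) (c : String) :
    (cats.foldl pvBStep (counts, remaining)).1.getD c 0
      = counts.getD c 0
        + ((remaining.countP (fun d => pvFirstMatch (cats.map PySem.Str.lower) d == some c) : Int)) := by
  induction cats generalizing counts remaining with
  | nil => simp [pvFirstMatch]
  | cons cat rest ih =>
    simp only [List.foldl_cons, pvBStep, List.map_cons]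
    rw [pvPartition]
    simp only [zero_add, List.nil_append]
    rw [ih]
    rw [List.countP_eq_countP_filter_add remaining
      (fun d => pvFirstMatch (PySem.Str.lower cat :: rest.map PySem.Str.lower) d == some c)
      (fun d => PySem.Str.isIn (PySem.Str.lower cat) d)]
    by_cases hc : c = PySem.Str.lower cat
    · subst hc
      rw [PySem.Dict.getD_insert_self]
      have h1 : (remaining.filter (fun d => PySem.Str.isIn (PySem.Str.lower cat) d)).countP
          (fun d => pvFirstMatch (PySem.Str.lower cat :: rest.map PySem.Str.lower) d == some (PySem.Str.lower cat))
          = (remaining.filter (fun d => PySem.Str.isIn (PySem.Str.lower cat) d)).length := by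
        rw [List.countP_eq_length]
        intro d hd
        have hin := List.of_mem_filter hd
        unfold pvFirstMatch
        rw [List.find?_cons_of_pos (p := fun c => PySem.Str.isIn c d) hin]
        simp
      have h2 : (remaining.filter (fun d => !PySem.Str.isIn (PySem.Str.lower cat) d)).countP
          (fun d => pvFirstMatch (PySem.Str.lower cat :: rest.map PySem.Str.lower) d == some (PySem.Str.lower cat))
          = (remaining.filter (fun d => !PySem.Str.isIn (PySem.Str.lower cat) d)).countP
          (fun d => pvFirstMatch (rest.map PySem.Str.lower) d == some (PySem.Str.lower cat)) := by
        apply List.countP_congr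
        intro d hd
        have hin := List.of_mem_filter hd
        simp only [Bool.not_eq_eq_eq_not, Bool.not_true] at hin
        unfold pvFirstMatch
        rw [List.find?_cons_of_neg (p := fun c => PySem.Str.isIn c d) (by show ¬ (PySem.Str.isIn (PySem.Str.lower cat) d = true); rw [hin]; simp)]
      rw [h1, h2, List.countP_eq_length_filter]
      push_cast
      ring
    · rw [PySem.Dict.getD_insert_of_ne _ _ _ hc]
      have h1 : (remaining.filter (fun d => PySem.Str.isIn (PySem.Str.lower cat) d)).countP
          (fun d => pvFirstMatch (PySem.Str.lower cat :: rest.map PySem.Str.lower) d == some c) = 0 := by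
        rw [List.countP_eq_zero]
        intro d hd
        have hin := List.of_mem_filter hd
        unfold pvFirstMatch
        rw [List.find?_cons_of_pos (p := fun c => PySem.Str.isIn c d) hin]
        simp only [beq_iff_eq, Option.some.injEq]
        exact fun h => hc h.symm
      have h2 : (remaining.filter (fun d => !PySem.Str.isIn (PySem.Str.lower cat) d)).countP
          (fun d => pvFirstMatch (PySem.Str.lower cat :: rest.map PySem.Str.lower) d == some c)
          = (remaining.filter (fun d => !PySem.Str.isIn (PySem.Str.lower cat) d)).countP
          (fun d => pvFirstMatch (rest.map PySem.Str.lower) d == some c) := by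
        apply List.countP_congr
        intro d hd
        have hin := List.of_mem_filter hd
        simp only [Bool.not_eq_eq_eq_not, Bool.not_true] at hin
        unfold pvFirstMatch
        rw [List.find?_cons_of_neg (p := fun c => PySem.Str.isIn c d) (by show ¬ (PySem.Str.isIn (PySem.Str.lower cat) d = true); rw [hin]; simp)]
      rw [h1, h2]
      push_cast
      ring

-- the two output folds agree once the per-category values agree
theorem pvFold_congr (cats : List String) (f g : String → Int)
    (h : ∀ cat ∈ cats, f cat = g cat) (d : PySem.Dict String Int) :
    cats.foldl (fun d cat => d.insert cat (f cat)) d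
      = cats.foldl (fun d cat => d.insert cat (g cat)) d := by
  induction cats generalizing d with
  | nil => rfl
  | cons cat rest ih =>
    simp only [List.foldl_cons]
    rw [h cat List.mem_cons_self]
    exact ih (fun c hc => h c (List.mem_cons_of_mem _ hc)) _

-- ===== VERDICT (by name: the statement is the Claim_ definition above) =====
theorem process_bank_operations_spec : Claim_equal_process_bank_operations := by
  intro data categories _
  unfold Spec_process_bank_operations process_bank_operations process_bank_operations_alt
  simp only []
  congr 1
  apply pvFold_congr
  intro cat _
  rw [pvA_matched, List.nil_append, PySem.Dict.getD_counter, pvCount_filterMap,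
    pvB_invariant, PySem.Dict.getD_empty]
  simp
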